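-- pv_equiv track=rewrite | github.com/Guy-SYD/parser-bot | src/categorize_sections.py | _apply_cross_routing
-- ===== SOURCE A (Python) =====
-- _CROSS_ROUTE_RULES: list[tuple[str, str, list[str]]] = [
--     # Comms items that land in nav sections (main helm, electronics & nav)
--     ("NAVIGATION EQUIPMENT", "COMMUNICATION EQUIPMENT", [
--         "vhf", "ssb", "satcom", "sat com", "gmdss", "iridium", "starlink",
--         "thrane", "vsat", "felcom", "uhf", "mf/hf", "hf radio", "navtex",
--         "telephone", "intercom", "pbx", "wifi", "wi-fi", "internet", "4g", "5g",
--         "lte", "gsm", "cellular", "voip", "radio", "sailor rt", "simrad rs",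
--         "sailor 5000", "kvh u7", "kvh u",
--     ]),
--     # Entertainment items that land in nav sections (TV at helm, sound system)
--     ("NAVIGATION EQUIPMENT", "ENTERTAINMENT EQUIPMENT", [
--         " tv ", "television", " screen", "dvd", "blu-ray", "bluray",
--         "satellite tv", "apple tv", "sonos", "speaker", "audio",
--         "fusion msnrx", "fusion ms",
--     ]),
--     # Safety items that land in deck sections
--     ("DECK EQUIPMENT", "SAFETY & SECURITY EQUIPMENT", [
--         "life raft", "liferaft", "epirb", "sart", "flare", "lifejacket",
--         "life jacket", "lifebuoy", "life ring", "fire extinguisher",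
--         "extinguisher", "immersion suit", "survival suit", "smoke alarm",
--         "fire alarm", "fire suppression", "co2", "fire hose",
--     ]),
--     # Entertainment items in deck sections
--     ("DECK EQUIPMENT", "ENTERTAINMENT EQUIPMENT", [
--         " tv", "television", "flat screen", "led tv", "plasma",
--         "speaker", "surround sound", "bose", "sound system",
--     ]),
-- ]
--
-- def _apply_cross_routing(sections: dict[str, list[str]]) -> dict[str, list[str]]:
--     """
--     Move lines between section buckets before per-section categorization,
--     based on keyword matching. Modifies a copy of the sections dict.
--     """
--     # Work on copies so we don't mutate the input
--     result = {k: list(v) for k, v in sections.items()}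
--
--     for src_key, dst_key, keywords in _CROSS_ROUTE_RULES:
--         if src_key not in result:
--             continue
--         stay, move = [], []
--         for line in result[src_key]:
--             lower = line.lower()
--             if any(kw in lower for kw in keywords):
--                 move.append(line)
--             else:
--                 stay.append(line)
--         if move:
--             result[src_key] = stay
--             result.setdefault(dst_key, []).extend(move)
--
--     return result
-- ===== SOURCE B (Python) =====
-- _CROSS_ROUTE_RULES: list[tuple[str, str, list[str]]] = [
--     ("NAVIGATION EQUIPMENT", "COMMUNICATION EQUIPMENT", [
--         "vhf", "ssb", "satcom", "sat com", "gmdss", "iridium", "starlink",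
--         "thrane", "vsat", "felcom", "uhf", "mf/hf", "hf radio", "navtex",
--         "telephone", "intercom", "pbx", "wifi", "wi-fi", "internet", "4g", "5g",
--         "lte", "gsm", "cellular", "voip", "radio", "sailor rt", "simrad rs",
--         "sailor 5000", "kvh u7", "kvh u",
--     ]),
--     ("NAVIGATION EQUIPMENT", "ENTERTAINMENT EQUIPMENT", [
--         " tv ", "television", " screen", "dvd", "blu-ray", "bluray",
--         "satellite tv", "apple tv", "sonos", "speaker", "audio",
--         "fusion msnrx", "fusion ms",
--     ]),
--     ("DECK EQUIPMENT", "SAFETY & SECURITY EQUIPMENT", [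
--         "life raft", "liferaft", "epirb", "sart", "flare", "lifejacket",
--         "life jacket", "lifebuoy", "life ring", "fire extinguisher",
--         "extinguisher", "immersion suit", "survival suit", "smoke alarm",
--         "fire alarm", "fire suppression", "co2", "fire hose",
--     ]),
--     ("DECK EQUIPMENT", "ENTERTAINMENT EQUIPMENT", [
--         " tv", "television", "flat screen", "led tv", "plasma",
--         "speaker", "surround sound", "bose", "sound system",
--     ]),
-- ]
--
--
-- def _apply_cross_routing(sections: dict[str, list[str]]) -> dict[str, list[str]]:
--     """Single pass per source bucket: group the rules by source key, then route
--     each line to the first matching rule's destination (first-match wins)."""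
--     result = {k: list(v) for k, v in sections.items()}
--
--     groups: dict[str, list[tuple[str, list[str]]]] = {}
--     for src, dst, kws in _CROSS_ROUTE_RULES:
--         groups.setdefault(src, []).append((dst, kws))
--
--     for src, rules in groups.items():
--         if src not in result:
--             continue
--         stay: list[str] = []
--         moved: list[list[str]] = [[] for _ in rules]
--         for line in result[src]:
--             lower = line.lower()
--             hit = next(
--                 (i for i, (_, kws) in enumerate(rules)
--                  if any(kw in lower for kw in kws)),
--                 None,
--             )
--             if hit is None:
--                 stay.append(line)
--             else:
--                 moved[hit].append(line)
--         if any(moved):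
--             result[src] = stay
--             for (dst, _), mv in zip(rules, moved):
--                 if mv:
--                     result[dst] = result.get(dst, []) + mv
--
--     return result
-- ===== Notes on version B (the rewrite author's own statement) =====
-- stated objective: alternative
-- what changed: Instead of re-scanning the (shrinking) source bucket once per rule, B groups the rules by source key and makes a single first-match-wins pass over each source bucket, collecting per-rule move lists and applying all bucket updates afterwards.
import Mathlib
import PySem

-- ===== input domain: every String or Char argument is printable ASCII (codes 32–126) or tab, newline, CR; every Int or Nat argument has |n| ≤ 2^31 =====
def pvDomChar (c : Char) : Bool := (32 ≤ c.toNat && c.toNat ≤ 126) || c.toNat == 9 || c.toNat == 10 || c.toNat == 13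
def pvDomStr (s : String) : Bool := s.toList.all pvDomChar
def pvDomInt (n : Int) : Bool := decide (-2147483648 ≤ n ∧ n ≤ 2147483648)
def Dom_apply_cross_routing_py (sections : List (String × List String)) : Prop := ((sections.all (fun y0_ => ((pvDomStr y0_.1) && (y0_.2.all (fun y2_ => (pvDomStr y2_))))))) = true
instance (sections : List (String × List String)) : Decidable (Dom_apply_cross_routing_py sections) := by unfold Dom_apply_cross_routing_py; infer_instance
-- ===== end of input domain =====

-- B groups the routing rules by source key and routes each source bucket's lines in a single
-- first-match-wins pass (alternative decomposition; same results, return-value equivalence).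


-- ===== PORT A =====

-- module constant _CROSS_ROUTE_RULES (keyword lists named for readability)
def pvKwComm : List String := [
  "vhf", "ssb", "satcom", "sat com", "gmdss", "iridium", "starlink",
  "thrane", "vsat", "felcom", "uhf", "mf/hf", "hf radio", "navtex",
  "telephone", "intercom", "pbx", "wifi", "wi-fi", "internet", "4g", "5g",
  "lte", "gsm", "cellular", "voip", "radio", "sailor rt", "simrad rs",
  "sailor 5000", "kvh u7", "kvh u"]
def pvKwEntNav : List String := [
  " tv ", "television", " screen", "dvd", "blu-ray", "bluray",
  "satellite tv", "apple tv", "sonos", "speaker", "audio",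
  "fusion msnrx", "fusion ms"]
def pvKwSafety : List String := [
  "life raft", "liferaft", "epirb", "sart", "flare", "lifejacket",
  "life jacket", "lifebuoy", "life ring", "fire extinguisher",
  "extinguisher", "immersion suit", "survival suit", "smoke alarm",
  "fire alarm", "fire suppression", "co2", "fire hose"]
def pvKwEntDeck : List String := [
  " tv", "television", "flat screen", "led tv", "plasma",
  "speaker", "surround sound", "bose", "sound system"]

def pvRules : List (String × String × List String) := [
  ("NAVIGATION EQUIPMENT", "COMMUNICATION EQUIPMENT", pvKwComm),
  ("NAVIGATION EQUIPMENT", "ENTERTAINMENT EQUIPMENT", pvKwEntNav),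
  ("DECK EQUIPMENT", "SAFETY & SECURITY EQUIPMENT", pvKwSafety),
  ("DECK EQUIPMENT", "ENTERTAINMENT EQUIPMENT", pvKwEntDeck)]

-- any(kw in line.lower() for kw in keywords)
def pvMatches (kws : List String) (line : String) : Bool :=
  kws.any (fun kw => PySem.Str.isIn kw (PySem.Str.lower line))

-- the body of A's inner 'for line in result[src_key]' loop, state = (stay, move)
def pvSplitLine (kws : List String) (p : List String × List String) (line : String) :
    List String × List String :=
  if pvMatches kws line then (p.1, p.2 ++ [line]) else (p.1 ++ [line], p.2)

-- one iteration of A's 'for src_key, dst_key, keywords in _CROSS_ROUTE_RULES' loop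
def pvStepA (d : PySem.Dict String (List String)) (rule : String × String × List String) :
    PySem.Dict String (List String) :=
  if d.contains rule.1 = false then d
  else
    let sm := (d.getD rule.1 []).foldl (pvSplitLine rule.2.2) ([], [])
    if sm.2 = [] then d
    -- result.setdefault(dst_key, []).extend(move)  ==  d[dst] = d.get(dst, []) + move
    else (d.insert rule.1 sm.1).modify rule.2.1 [] (· ++ sm.2)

def apply_cross_routing_py (sections : List (String × List String)) :
    List (String × List String) :=
  -- result = {k: list(v) for k, v in sections.items()}
  let result := sections.foldl (fun d p => d.insert p.1 p.2) PySem.Dict.empty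
  (pvRules.foldl pvStepA result).items

-- ===== PORT B =====

-- hit = next((i for i, (_, kws) in enumerate(rules) if any(kw in lower for kw in kws)), None)
def pvHit (rules : List (String × List String)) (lower : String) : Option Nat :=
  rules.findIdx? (fun r => r.2.any (fun kw => PySem.Str.isIn kw lower))

-- body of B's single pass over result[src], state = (stay, moved)
def pvRouteLine (rules : List (String × List String))
    (p : List String × List (List String)) (line : String) :
    List String × List (List String) :=
  match pvHit rules (PySem.Str.lower line) with
  | none => (p.1 ++ [line], p.2)
  | some i => (p.1, p.2.modify i (· ++ [line]))

-- one iteration of B's 'for src, rules in groups.items()' loop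
def pvStepB (d : PySem.Dict String (List String))
    (g : String × List (String × List String)) : PySem.Dict String (List String) :=
  if d.contains g.1 = false then d
  else
    let p := (d.getD g.1 []).foldl (pvRouteLine g.2) ([], g.2.map (fun _ => []))
    if p.2.any (fun mv => !mv.isEmpty) then
      let d1 := d.insert g.1 p.1
      (g.2.zip p.2).foldl
        (fun d rm => if rm.2 = [] then d else d.insert rm.1.1 (d.getD rm.1.1 [] ++ rm.2)) d1
    else d

def apply_cross_routing_py_alt (sections : List (String × List String)) :
    List (String × List String) :=
  let result := sections.foldl (fun d p => d.insert p.1 p.2) PySem.Dict.empty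
  -- groups.setdefault(src, []).append((dst, kws))
  let groups := pvRules.foldl
    (fun (g : PySem.Dict String (List (String × List String))) r =>
      g.modify r.1 [] (· ++ [(r.2.1, r.2.2)])) PySem.Dict.empty
  (groups.items.foldl pvStepB result).items

-- ===== PRECONDITION & SPEC =====
def Spec_apply_cross_routing_py (sections : List (String × List String)) (out : List (String × List String)) : Prop := out = apply_cross_routing_py_alt sections
instance (sections : List (String × List String)) (out : List (String × List String)) : Decidable (Spec_apply_cross_routing_py sections out) := by unfold Spec_apply_cross_routing_py; infer_instance

-- ===== CLAIM (what is proved, stated in full; the proofs are below) =====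
def Claim_equal_apply_cross_routing_py : Prop := ∀ (sections : List (String × List String)), Dom_apply_cross_routing_py sections → Spec_apply_cross_routing_py sections (apply_cross_routing_py sections)

-- ===== LEMMAS AND PROOFS =====

-- modify IS insert of getD (setdefault+extend and get+concat agree)
theorem pv_modify_eq_insert (d : PySem.Dict String (List String)) (k : String)
    (f : List String → List String) :
    d.modify k [] f = d.insert k (f (d.getD k [])) :=
  PySem.Dict.ext_iff.mpr rfl

-- if nothing in l matched p, filtering out the matches keeps l
theorem pv_filter_not_eq_self (p : String → Bool) (l : List String)
    (h : l.filter p = []) : l.filter (fun x => !p x) = l := by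
  rw [List.filter_congr (q := fun _ => true), List.filter_true]
  intro x hx
  simp [List.filter_eq_nil_iff.mp h x hx]

-- A's partition loop, characterised by filters
theorem pv_foldA (kws : List String) (lines s m : List String) :
    lines.foldl (pvSplitLine kws) (s, m)
      = (s ++ lines.filter (fun l => !pvMatches kws l), m ++ lines.filter (pvMatches kws)) := by
  induction lines generalizing s m with
  | nil => simp
  | cons x xs ih =>
    simp only [List.foldl_cons, pvSplitLine, List.filter_cons]
    by_cases h : pvMatches kws x = true <;> simp [h, ih]

-- first-match lookup on a two-rule group
theorem pv_hit2 (d1 d2 : String) (k1 k2 : List String) (x : String) :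
    pvHit [(d1, k1), (d2, k2)] (PySem.Str.lower x)
      = if pvMatches k1 x then some 0 else if pvMatches k2 x then some 1 else none := by
  show List.findIdx? (fun r => r.2.any (fun kw => PySem.Str.isIn kw (PySem.Str.lower x)))
        [(d1, k1), (d2, k2)] = _
  rw [List.findIdx?_cons, List.findIdx?_cons, List.findIdx?_nil]
  have e1 : (k1.any fun kw => PySem.Str.isIn kw (PySem.Str.lower x)) = pvMatches k1 x := rfl
  have e2 : (k2.any fun kw => PySem.Str.isIn kw (PySem.Str.lower x)) = pvMatches k2 x := rfl
  rw [e1, e2]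
  by_cases h1 : pvMatches k1 x = true <;> by_cases h2 : pvMatches k2 x = true <;>
    simp [h1, h2]

-- B's single pass over a two-rule group, characterised by filters
theorem pv_foldB (d1 d2 : String) (k1 k2 : List String) (lines s a b : List String) :
    lines.foldl (pvRouteLine [(d1, k1), (d2, k2)]) (s, [a, b])
      = (s ++ lines.filter (fun l => !pvMatches k1 l && !pvMatches k2 l),
         [a ++ lines.filter (pvMatches k1),
          b ++ lines.filter (fun l => !pvMatches k1 l && pvMatches k2 l)]) := by
  induction lines generalizing s a b with
  | nil => simp
  | cons x xs ih =>
    simp only [List.foldl_cons, pvRouteLine, pv_hit2, List.filter_cons]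
    by_cases h1 : pvMatches k1 x = true <;> by_cases h2 : pvMatches k2 x = true <;>
      simp [h1, h2, List.modify, ih]

-- overwriting an already-present key commutes (as an items list) with any other-key insert
theorem pv_insert_comm {ν : Type} (d : PySem.Dict String ν) (k k' : String) (v w : ν)
    (hc : d.contains k = true) (hne : k' ≠ k) :
    (d.insert k' w).insert k v = (d.insert k v).insert k' w := by
  apply PySem.Dict.ext
  have hck : (d.insert k' w).contains k = true := by
    rw [PySem.Dict.contains_insert]; simp [hc]
  by_cases hc' : d.contains k' = true
  · have hck' : (d.insert k v).contains k' = true := by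
      rw [PySem.Dict.contains_insert]; simp [hc']
    rw [PySem.Dict.items_insert, if_pos hck, PySem.Dict.items_insert, if_pos hc',
        PySem.Dict.items_insert, if_pos hck', PySem.Dict.items_insert, if_pos hc,
        List.map_map, List.map_map]
    apply List.map_congr_left
    intro p _
    by_cases e1 : p.1 = k <;> by_cases e2 : p.1 = k' <;>
      simp_all [Function.comp, beq_iff_eq]
  · have hck' : (d.insert k v).contains k' = false := by
      rw [PySem.Dict.contains_insert]
      simp [hc', hne]
    rw [PySem.Dict.items_insert, if_pos hck, PySem.Dict.items_insert, if_neg (by simp [hc']),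
        PySem.Dict.items_insert, if_neg (by simp [hck']), PySem.Dict.items_insert, if_pos hc,
        List.map_append]
    simp [hne]

-- pvStepA, written out (dst ≠ src)
theorem pv_stepA_eq (d : PySem.Dict String (List String)) (src dst : String)
    (kws : List String) (h : dst ≠ src) :
    pvStepA d (src, dst, kws)
      = if d.contains src = false then d
        else if (d.getD src []).filter (pvMatches kws) = [] then d
        else (d.insert src ((d.getD src []).filter (fun l => !pvMatches kws l))).insert dst
               (d.getD dst [] ++ (d.getD src []).filter (pvMatches kws)) := by
  unfold pvStepA
  by_cases hc : d.contains src = false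
  · simp [hc]
  · simp only [hc]
    rw [pv_foldA]
    simp only [List.nil_append]
    by_cases hm : (d.getD src []).filter (pvMatches kws) = []
    · simp [hm]
    · simp only [hm, if_false]
      rw [pv_modify_eq_insert, PySem.Dict.getD_insert_of_ne _ _ _ h]

-- pvStepB on a two-rule group, written out (d1 ≠ src, d2 ≠ src, d2 ≠ d1)
theorem pv_stepB_eq (d : PySem.Dict String (List String)) (src d1 d2 : String)
    (k1 k2 : List String) (h1 : d1 ≠ src) (h2 : d2 ≠ src) (h12 : d2 ≠ d1) :
    pvStepB d (src, [(d1, k1), (d2, k2)])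
      = if d.contains src = false then d
        else
          let L := d.getD src []
          let M1 := L.filter (pvMatches k1)
          let M2 := L.filter (fun l => !pvMatches k1 l && pvMatches k2 l)
          if M1 = [] ∧ M2 = [] then d
          else
            let e := d.insert src (L.filter (fun l => !pvMatches k1 l && !pvMatches k2 l))
            let e1 := if M1 = [] then e else e.insert d1 (d.getD d1 [] ++ M1)
            if M2 = [] then e1 else e1.insert d2 (d.getD d2 [] ++ M2) := by
  unfold pvStepB
  by_cases hc : d.contains src = false
  · simp [hc]
  · have hct : d.contains src = true := by simpa using hc
    simp only [hct, Bool.true_eq_false, if_false, List.map_cons, List.map_nil]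
    rw [pv_foldB]
    simp only [List.nil_append, List.any_cons, List.any_nil, List.zip_cons_cons,
      List.zip_nil_right, List.foldl_cons, List.foldl_nil]
    set L := d.getD src [] with hL
    set M1 := L.filter (pvMatches k1) with hM1
    set M2 := L.filter (fun l => !pvMatches k1 l && pvMatches k2 l) with hM2
    by_cases e1 : M1 = [] <;> by_cases e2 : M2 = []
    · simp [e1, e2]
    · have i2 : M2.isEmpty = false := by simp [e2]
      simp [e1, e2, i2, PySem.Dict.getD_insert, h2]
    · have i1 : M1.isEmpty = false := by simp [e1]
      simp [e1, e2, i1, PySem.Dict.getD_insert, h1]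
    · have i1 : M1.isEmpty = false := by simp [e1]
      have i2 : M2.isEmpty = false := by simp [e2]
      simp [e1, e2, i1, i2, PySem.Dict.getD_insert, h1, h2, h12]

-- a two-rule group processed in one pass equals the two rules processed one after the other
theorem pv_group2 (d : PySem.Dict String (List String)) (src d1 d2 : String)
    (k1 k2 : List String) (h1 : d1 ≠ src) (h2 : d2 ≠ src) (h12 : d2 ≠ d1) :
    pvStepB d (src, [(d1, k1), (d2, k2)])
      = pvStepA (pvStepA d (src, d1, k1)) (src, d2, k2) := by
  rw [pv_stepB_eq d src d1 d2 k1 k2 h1 h2 h12]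
  by_cases hc : d.contains src = false
  · have hA1 : pvStepA d (src, d1, k1) = d := by
      rw [pv_stepA_eq d src d1 k1 h1]; simp [hc]
    rw [hA1, pv_stepA_eq d src d2 k2 h2]
    simp [hc]
  · simp only [hc]
    set L := d.getD src [] with hL
    set M1 := L.filter (pvMatches k1) with hM1
    set M2 := L.filter (fun l => !pvMatches k1 l && pvMatches k2 l) with hM2
    by_cases e1 : M1 = []
    · -- the first rule moves nothing: A's first step is the identity
      have hall : ∀ l ∈ L, pvMatches k1 l = false := by
        intro l hl
        simpa using List.filter_eq_nil_iff.mp e1 l hl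
      have hM2' : M2 = L.filter (pvMatches k2) := by
        rw [hM2]
        apply List.filter_congr
        intro x hx
        simp [hall x hx]
      have hS2 : L.filter (fun l => !pvMatches k1 l && !pvMatches k2 l)
          = L.filter (fun l => !pvMatches k2 l) := by
        apply List.filter_congr
        intro x hx
        simp [hall x hx]
      have hA1 : pvStepA d (src, d1, k1) = d := by
        rw [pv_stepA_eq d src d1 k1 h1]
        simp [hc, ← hL, ← hM1, e1]
      rw [hA1, pv_stepA_eq d src d2 k2 h2]
      simp only [hc, ← hL, ← hM2', hS2, e1, true_and]
      by_cases e2 : M2 = []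
      · simp [e2]
      · simp [e2]
    · -- the first rule moves something
      set S1 := L.filter (fun l => !pvMatches k1 l) with hS1
      have hA1 : pvStepA d (src, d1, k1)
          = (d.insert src S1).insert d1 (d.getD d1 [] ++ M1) := by
        rw [pv_stepA_eq d src d1 k1 h1]
        simp [hc, ← hL, ← hM1, e1, ← hS1]
      have hfilter2 : S1.filter (pvMatches k2) = M2 := by
        rw [hS1, hM2, List.filter_filter]
        apply List.filter_congr
        intro x _
        exact Bool.and_comm _ _
      have hfilter2' : S1.filter (fun l => !pvMatches k2 l)
          = L.filter (fun l => !pvMatches k1 l && !pvMatches k2 l) := by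
        rw [hS1, List.filter_filter]
        apply List.filter_congr
        intro x _
        exact Bool.and_comm _ _
      have hcontains : (pvStepA d (src, d1, k1)).contains src = true := by
        rw [hA1, PySem.Dict.contains_insert]
        simp [PySem.Dict.contains_insert_self]
      have hgetsrc : (pvStepA d (src, d1, k1)).getD src [] = S1 := by
        rw [hA1, PySem.Dict.getD_insert_of_ne _ _ _ (Ne.symm h1), PySem.Dict.getD_insert_self]
      rw [pv_stepA_eq (pvStepA d (src, d1, k1)) src d2 k2 h2]
      simp only [hcontains, Bool.true_eq_false, if_false, hgetsrc, hfilter2, hfilter2']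
      by_cases e2 : M2 = []
      · have hSS : L.filter (fun l => !pvMatches k1 l && !pvMatches k2 l) = S1 := by
          rw [← hfilter2']
          apply pv_filter_not_eq_self
          rw [hfilter2, e2]
        rw [hA1]
        simp [e1, e2, hSS]
      · have hg2 : ((d.insert src S1).insert d1 (d.getD d1 [] ++ M1)).getD d2 []
              = d.getD d2 [] := by
          rw [PySem.Dict.getD_insert_of_ne _ _ _ h12, PySem.Dict.getD_insert_of_ne _ _ _ h2]
        have hcomm : ((d.insert src S1).insert d1 (d.getD d1 [] ++ M1)).insert src
              (L.filter fun l => !pvMatches k1 l && !pvMatches k2 l)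
            = (d.insert src (L.filter fun l => !pvMatches k1 l && !pvMatches k2 l)).insert d1
                (d.getD d1 [] ++ M1) := by
          rw [pv_insert_comm (d.insert src S1) src d1 _ _
                (PySem.Dict.contains_insert_self _ _ _) h1,
              PySem.Dict.insert_insert_self]
        rw [hA1]
        simp only [e1, false_and, if_false, if_neg e2]
        rw [hg2, hcomm]

-- the grouped rule list, evaluated
theorem pv_groups_eval :
    (pvRules.foldl
      (fun (g : PySem.Dict String (List (String × List String))) r =>
        g.modify r.1 [] (· ++ [(r.2.1, r.2.2)])) PySem.Dict.empty).items
      = [("NAVIGATION EQUIPMENT",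
           [("COMMUNICATION EQUIPMENT", pvKwComm), ("ENTERTAINMENT EQUIPMENT", pvKwEntNav)]),
         ("DECK EQUIPMENT",
           [("SAFETY & SECURITY EQUIPMENT", pvKwSafety), ("ENTERTAINMENT EQUIPMENT", pvKwEntDeck)])] := by
  rfl

-- ===== VERDICT (by name: the statement is the Claim_ definition above) =====
theorem apply_cross_routing_py_spec : Claim_equal_apply_cross_routing_py := by
  intro sections _
  unfold Spec_apply_cross_routing_py apply_cross_routing_py apply_cross_routing_py_alt
  simp only
  congr 1
  rw [pv_groups_eval]
  simp only [pvRules, List.foldl_cons, List.foldl_nil]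
  rw [pv_group2 _ _ _ _ _ _ (by decide) (by decide) (by decide),
      pv_group2 _ _ _ _ _ _ (by decide) (by decide) (by decide)]
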